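-- pv_equiv track=rewrite | github.com/dudamarlena/pyc_source | pycfiles/ore.svn-1.0.5-py2.5/utils.py | svn_path_parent
-- ===== SOURCE A (Python) =====
-- def svn_path_parent(svnpath):
--     idx = svnpath.rfind('/')
--     if idx == 0:
--         return '/'
--     parent, name = svnpath[:idx], svnpath[idx:]
--     if name == '/':
--         return svn_path_parent(svnpath[:idx])
--     return parent
-- ===== SOURCE B (Python) =====
-- def svn_path_parent(svnpath):
--     # Strip all trailing slashes in one pass, then take everything before the last remaining slash.
--     t = svnpath.rstrip('/')
--     if not t:
--         # svnpath was empty or consisted only of slashes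
--         return '/' if svnpath else ''
--     i = t.rfind('/')
--     if i == 0:
--         return '/'
--     return t[:i]
-- ===== Notes on version B (the rewrite author's own statement) =====
-- stated objective: alternative
-- what changed: A strips one trailing slash per recursive call, re-running rfind each time; B removes all trailing slashes in one single right-strip pass, handles the empty and all-slash strings directly, and takes the prefix before a single final rfind.
import Mathlib
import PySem

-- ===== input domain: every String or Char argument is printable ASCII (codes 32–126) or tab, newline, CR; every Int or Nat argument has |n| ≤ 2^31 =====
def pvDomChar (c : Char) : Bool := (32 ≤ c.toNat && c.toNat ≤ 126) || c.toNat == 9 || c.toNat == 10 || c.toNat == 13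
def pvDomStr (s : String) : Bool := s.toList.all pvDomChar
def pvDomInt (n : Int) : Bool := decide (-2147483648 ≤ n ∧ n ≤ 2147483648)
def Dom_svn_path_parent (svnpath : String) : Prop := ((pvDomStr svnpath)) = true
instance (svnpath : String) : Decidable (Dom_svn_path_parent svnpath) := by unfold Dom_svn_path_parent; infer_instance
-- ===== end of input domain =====

-- B replaces A's one-slash-at-a-time recursion by a single rstrip('/') pass plus one rfind (alternative decomposition; return value only, no mutation involved).

-- ===== PORT A =====
-- termination helper for A's recursion: when svnpath[idx:] == '/', svnpath[:idx] is strictly shorter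
theorem pvSliceLenLt (l : List Char) (idx : Int)
    (h : PySem.Chars.slice l (some idx) none = ['/']) :
    (PySem.Chars.slice l none (some idx)).length < l.length := by
  simp only [PySem.Chars.slice_eq_listSlice, PySem.List.slice] at h ⊢
  have hle : PySem.List.clampIdx l.length idx ≤ l.length := PySem.List.clampIdx_le _ _
  have hlen := congrArg List.length h
  simp at hlen ⊢
  omega

-- literal transliteration of A (on code points; the String wrapper below)
def svnA (l : List Char) : List Char :=
  let idx := PySem.Chars.rfind l ['/']
  if idx = 0 then ['/']
  else
    let parent := PySem.Chars.slice l none (some idx)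
    let name := PySem.Chars.slice l (some idx) none
    if h2 : name = ['/'] then svnA parent
    else parent
termination_by l.length
decreasing_by exact pvSliceLenLt l _ h2

def svn_path_parent (svnpath : String) : String :=
  String.ofList (svnA svnpath.toList)

-- ===== PORT B =====
-- svnpath.rstrip('/') on code points
def rstripSlash (l : List Char) : List Char :=
  (l.reverse.dropWhile (· == '/')).reverse

-- literal transliteration of B (on code points)
def svnB (l : List Char) : List Char :=
  let t := rstripSlash l
  if t = [] then (if l = [] then [] else ['/'])
  else
    let i := PySem.Chars.rfind t ['/']
    if i = 0 then ['/'] else PySem.Chars.slice t none (some i)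

def svn_path_parent_alt (svnpath : String) : String :=
  String.ofList (svnB svnpath.toList)

-- ===== PRECONDITION & SPEC =====
def Spec_svn_path_parent (svnpath : String) (out : String) : Prop := out = svn_path_parent_alt svnpath
instance (svnpath : String) (out : String) : Decidable (Spec_svn_path_parent svnpath out) := by unfold Spec_svn_path_parent; infer_instance

-- ===== CLAIM (what is proved, stated in full; the proofs are below) =====
def Claim_equal_svn_path_parent : Prop := ∀ (svnpath : String), Dom_svn_path_parent svnpath → Spec_svn_path_parent svnpath (svn_path_parent svnpath)

-- ===== LEMMAS AND PROOFS =====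

theorem rfind_go_succ (s sub : List Char) (j : Nat) :
    PySem.Chars.rfind.go s sub (j+1) =
      if sub.isPrefixOf (List.drop (j+1) s) then ((j:Int)+1) else PySem.Chars.rfind.go s sub j := by
  rw [PySem.Chars.rfind.go.eq_def]
  push_cast
  rfl

theorem rfind_go_zero (s sub : List Char) :
    PySem.Chars.rfind.go s sub 0 = if sub.isPrefixOf s then 0 else -1 := by
  rw [PySem.Chars.rfind.go.eq_def]

theorem slice_from_eq_drop (l : List Char) (i : Int) :
    PySem.List.slice l (some i) none = l.drop (PySem.List.clampIdx l.length i) := by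
  simp [PySem.List.slice, List.take_of_length_le]

theorem svnA_nil : svnA [] = [] := by
  rw [svnA]
  have h : PySem.Chars.rfind ([] : List Char) ['/'] = -1 := by
    simp only [PySem.Chars.rfind, List.length_nil]
    rw [rfind_go_zero]
    simp [List.isPrefixOf]
  simp [h, PySem.Chars.slice_eq_listSlice, PySem.List.slice]

theorem svnA_slash : svnA ['/'] = ['/'] := by
  rw [svnA]
  have h : PySem.Chars.rfind ['/'] ['/'] = 0 := by
    simp only [PySem.Chars.rfind, List.length_singleton]
    rw [show (1 : Nat) = 0 + 1 from rfl, rfind_go_succ, rfind_go_zero]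
    simp [List.isPrefixOf]
  simp [h]

-- rfind of a string whose last character is '/' (and with at least one more character) is length-1
theorem rfind_append_slash (m : List Char) (hm : m ≠ []) :
    PySem.Chars.rfind (m ++ ['/']) ['/'] = (m.length : Int) := by
  rcases m with _ | ⟨x, xs⟩
  · exact absurd rfl hm
  · simp only [PySem.Chars.rfind, List.length_append, List.length_cons, List.length_nil]
    rw [show xs.length + 1 + 1 = (xs.length + 1) + 1 from rfl, rfind_go_succ, rfind_go_succ]
    have hd1 : List.drop (xs.length + 1 + 1) (x :: xs ++ ['/']) = [] := by
      apply List.drop_eq_nil_of_le; simp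
    have hd2 : List.drop (xs.length + 1) (x :: xs ++ ['/']) = ['/'] := by
      rw [List.drop_append_of_le_length (by simp)]
      simp

    rw [hd1, hd2]
    simp [List.isPrefixOf]

-- if some drop of l is exactly "/", then l ends in '/'
theorem last_slash_of_drop (l : List Char) (a : Nat) (h : l.drop a = ['/']) :
    l.getLast? = some '/' := by
  have hl : l = l.take a ++ ['/'] := by rw [← h, List.take_append_drop]
  rw [hl, List.getLast?_concat]

-- stripping commutes with removing one trailing slash
theorem rstripSlash_append_slash (m : List Char) :
    rstripSlash (m ++ ['/']) = rstripSlash m := by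
  simp [rstripSlash]

theorem svnB_append_slash (m : List Char) (hm : m ≠ []) :
    svnB (m ++ ['/']) = svnB m := by
  unfold svnB
  rw [rstripSlash_append_slash]
  have h1 : m ++ ['/'] ≠ [] := by simp
  simp only [if_neg hm, if_neg h1]

theorem rstripSlash_no_slash (m : List Char) (c : Char) (hc : c ≠ '/') :
    rstripSlash (m ++ [c]) = m ++ [c] := by
  simp only [rstripSlash, List.reverse_append, List.reverse_singleton,
    List.singleton_append, List.dropWhile_cons]
  have h : (c == '/') = false := by simpa using hc
  simp [h]

theorem svnA_eq_svnB_len : ∀ (n : Nat) (l : List Char), l.length ≤ n → svnA l = svnB l := by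
  intro n
  induction n with
  | zero =>
    intro l hl
    have h : l = [] := List.eq_nil_of_length_eq_zero (Nat.le_zero.mp hl)
    subst h; rw [svnA_nil]; decide
  | succ n ih =>
    intro l hl
    rcases hrev : l.reverse with _ | ⟨c, r⟩
    · have h : l = [] := by simpa using congrArg List.reverse hrev
      subst h; rw [svnA_nil]; decide
    · have hl' : l = r.reverse ++ [c] := by
        have h := congrArg List.reverse hrev
        simpa using h
      by_cases hc : c = '/'
      · subst hc
        by_cases hmne : r.reverse = []
        · -- l = ['/']
          rw [hl', hmne]
          rw [show ([] : List Char) ++ ['/'] = ['/'] from rfl, svnA_slash]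
          decide
        · -- l = m ++ ['/'] with m ≠ []
          have hrf : PySem.Chars.rfind (r.reverse ++ ['/']) ['/'] = ((r.reverse).length : Int) :=
            rfind_append_slash r.reverse hmne
          have hmlen : 1 ≤ r.reverse.length := by
            rcases hx : r.reverse with _ | _
            · exact absurd hx hmne
            · simp
          have hne0 : ¬ ((r.reverse.length : Int) = 0) := by
            exact_mod_cast by omega
          have hname : PySem.Chars.slice (r.reverse ++ ['/']) (some ((r.reverse).length : Int)) none = ['/'] := by
            simp only [PySem.Chars.slice_eq_listSlice]
            rw [PySem.List.slice_from_natCast]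
            simp
          have hpar : PySem.Chars.slice (r.reverse ++ ['/']) none (some ((r.reverse).length : Int)) = r.reverse := by
            simp only [PySem.Chars.slice_eq_listSlice]
            rw [PySem.List.slice_to_natCast]
            simp
          have hA : svnA (r.reverse ++ ['/']) = svnA r.reverse := by
            rw [svnA]
            simp only [hrf, hname, hpar, if_neg hne0]
            simp
          have hB : svnB (r.reverse ++ ['/']) = svnB r.reverse := svnB_append_slash r.reverse hmne
          have hlen : r.reverse.length ≤ n := by
            have h1 : l.length = r.reverse.length + 1 := by rw [hl']; simp
            omega
          rw [hl', hA, hB]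
          exact ih r.reverse hlen
      · -- last char of l is not '/'
        have hstrip : rstripSlash l = l := by
          rw [hl']; exact rstripSlash_no_slash r.reverse c hc
        have hlne : ¬ (l = []) := by rw [hl']; simp
        have hlast : l.getLast? = some c := by rw [hl']; exact List.getLast?_concat
        rw [svnA]; unfold svnB
        simp only [hstrip, if_neg hlne]
        by_cases hi : PySem.Chars.rfind l ['/'] = 0
        · rw [if_pos hi, if_pos hi]
        · rw [if_neg hi, if_neg hi]
          have hname : ¬ (PySem.Chars.slice l (some (PySem.Chars.rfind l ['/'])) none = ['/']) := by
            intro h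
            rw [PySem.Chars.slice_eq_listSlice, slice_from_eq_drop] at h
            have h2 := last_slash_of_drop l _ h
            rw [hlast] at h2
            exact hc (Option.some.inj h2)
          rw [dif_neg hname]

theorem svnA_eq_svnB (l : List Char) : svnA l = svnB l :=
  svnA_eq_svnB_len l.length l (le_refl _)

-- ===== VERDICT (by name: the statement is the Claim_ definition above) =====
theorem svn_path_parent_spec : Claim_equal_svn_path_parent := by
  intro s _
  unfold Spec_svn_path_parent svn_path_parent svn_path_parent_alt
  rw [svnA_eq_svnB]
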